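-- pv_equiv track=rewrite | github.com/ivgnk/Pyton-Codewars-Leetcode | Leetcode/2293_easy_Min Max Game.py | minMaxGame3
-- ===== SOURCE A (Python) =====
-- def minMaxGame3(nums):
--     """
--     :type nums: List[int]
--     :rtype: int
--     """
--     ll=len(nums)
--     while ll>1:
--         nn=[]
--         for i in range(0,ll//2):
--             i2=2*i
--             if i%2==0:
--                 nn.append(min(nums[i2], nums[i2 + 1]))
--             else:
--                 nn.append(max(nums[i2], nums[i2 + 1]))
--         nums=nn
--         ll=len(nums)
--     return nums[0]
-- ===== SOURCE B (Python) =====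
-- def minMaxGame3(nums):
--     """
--     :type nums: List[int]
--     :rtype: int
--     """
--     if len(nums) <= 1:
--         return nums[0]
--     it = iter(nums)
--     nxt = []
--     take_min = True
--     for a, b in zip(it, it):
--         nxt.append(min(a, b) if take_min else max(a, b))
--         take_min = not take_min
--     return minMaxGame3(nxt)
-- ===== Notes on version B (the rewrite author's own statement) =====
-- stated objective: alternative
-- what changed: Replaces A's index-driven while loop (range(ll//2) with 2*i indexing and i%2 parity tests) by a pairwise formulation: each level folds the consecutive zip-pairs of the list with a toggling min/max flag, and the top level recurses on the halved array.
import Mathlib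
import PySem

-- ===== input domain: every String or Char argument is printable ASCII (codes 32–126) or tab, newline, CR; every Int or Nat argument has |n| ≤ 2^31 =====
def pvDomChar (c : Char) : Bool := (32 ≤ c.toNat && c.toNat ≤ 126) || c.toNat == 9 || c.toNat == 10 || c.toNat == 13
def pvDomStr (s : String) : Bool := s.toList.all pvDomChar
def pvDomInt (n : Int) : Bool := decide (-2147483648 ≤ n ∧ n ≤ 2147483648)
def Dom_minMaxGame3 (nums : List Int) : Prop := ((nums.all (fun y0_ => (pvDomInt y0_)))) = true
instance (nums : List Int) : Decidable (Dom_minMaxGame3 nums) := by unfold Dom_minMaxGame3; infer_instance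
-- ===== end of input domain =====

-- B replaces A's index-driven while loop (append-accumulator over range(ll//2)) by a
-- pairwise formulation: each level is the fold of consecutive zip-pairs with a toggling
-- min/max flag, and the main function recurses on the halved level; equal on every
-- nonempty list (Pre_).

-- ===== PORT A =====
-- one pass of A's inner for-loop: for i < len(nums)//2 either min or max is appended to nn.
-- For i in range(len//2) the indices 2*i and 2*i+1 are always in range, so pyGet? never
-- returns none and '.getD 0' is exact (no IndexError inside the loop).
def pvStepA (nums : List Int) : List Int :=
  (PySem.List.pyRange 0 (PySem.Int.floordiv (nums.length : Int) 2) 1).foldl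
    (fun nn i =>
      let i2 := 2 * i
      if PySem.Int.mod i 2 = 0 then
        nn ++ [min ((PySem.List.pyGet? nums i2).getD 0) ((PySem.List.pyGet? nums (i2 + 1)).getD 0)]
      else
        nn ++ [max ((PySem.List.pyGet? nums i2).getD 0) ((PySem.List.pyGet? nums (i2 + 1)).getD 0)])
    []

-- A's while-loop: while len(nums) > 1, nums = next level.  Structural fuel recursion: the
-- level length halves each pass, so fuel = nums.length always suffices (the guard only makes
-- the same computation total; it is never exhausted before the loop condition fails).
def pvLoopA : Nat → List Int → List Int
  | 0, nums => nums
  | fuel + 1, nums => if 1 < nums.length then pvLoopA fuel (pvStepA nums) else nums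

-- final 'return nums[0]'; under Pre_ (nums ≠ []) the loop result is nonempty, so getD 0 is exact
def minMaxGame3 (nums : List Int) : Int :=
  (PySem.List.pyGet? (pvLoopA nums.length nums) 0).getD 0

-- ===== PORT B =====
-- zip(it, it): the consecutive pairs of the list (an unpaired last element is dropped)
def pvPairs : List Int → List (Int × Int)
  | a :: b :: rest => (a, b) :: pvPairs rest
  | _ => []

-- B's for-loop over the pairs: state = (nxt accumulator, take_min flag), appending
-- min or max and toggling the flag each step
def pvLevelB (nums : List Int) : List Int :=
  ((pvPairs nums).foldl
    (fun s p => (s.1 ++ [if s.2 then min p.1 p.2 else max p.1 p.2], !s.2))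
    ([], true)).1

-- B's main recursion: base case len ≤ 1 returns nums[0] (exact via getD under Pre_),
-- else recurse on the next level.  Fuel = length makes the recursion structural; it is
-- never exhausted before the base case (each level halves the length).
def pvAltB : Nat → List Int → Int
  | 0, nums => (PySem.List.pyGet? nums 0).getD 0
  | fuel + 1, nums =>
      if nums.length ≤ 1 then (PySem.List.pyGet? nums 0).getD 0
      else pvAltB fuel (pvLevelB nums)

def minMaxGame3_alt (nums : List Int) : Int := pvAltB nums.length nums

-- ===== PRECONDITION & SPEC =====
-- Pre_ excludes only the empty list, on which Python A raises IndexError (nums[0]).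
def Pre_minMaxGame3 (nums : List Int) : Prop := nums ≠ []
instance (nums : List Int) : Decidable (Pre_minMaxGame3 nums) := by unfold Pre_minMaxGame3; infer_instance
def pvWitness_minMaxGame3 : List Int := [70, 38, 21, 23]

def Spec_minMaxGame3 (nums : List Int) (out : Int) : Prop := out = minMaxGame3_alt nums
instance (nums : List Int) (out : Int) : Decidable (Spec_minMaxGame3 nums out) := by unfold Spec_minMaxGame3; infer_instance

-- ===== CLAIM (what is proved, stated in full; the proofs are below) =====
def Claim_equal_minMaxGame3 : Prop := ∀ (nums : List Int), Dom_minMaxGame3 nums → Pre_minMaxGame3 nums → Spec_minMaxGame3 nums (minMaxGame3 nums)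

-- ===== LEMMAS AND PROOFS =====

-- proof-side recursive presentation of B's pair fold (flag carried explicitly)
def pvLevelRec : List Int → Bool → List Int
  | a :: b :: rest, takeMin =>
      (if takeMin then min a b else max a b) :: pvLevelRec rest (!takeMin)
  | _, _ => []

theorem pvLevelB_foldl_rec : ∀ (nums : List Int) (f : Bool) (acc : List Int),
    ((pvPairs nums).foldl
      (fun s p => (s.1 ++ [if s.2 then min p.1 p.2 else max p.1 p.2], !s.2))
      (acc, f)).1 = acc ++ pvLevelRec nums f := by
  intro nums
  induction nums using pvPairs.induct with
  | case1 a b rest ih =>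
    intro f acc
    rw [pvPairs, List.foldl_cons, pvLevelRec]
    simp only
    rw [ih]
    simp
  | case2 nums h =>
    intro f acc
    cases nums with
    | nil => simp [pvPairs, pvLevelRec]
    | cons a t => cases t with
      | nil => simp [pvPairs, pvLevelRec]
      | cons b r => exact (h a b r rfl).elim

theorem pvLevelB_eq_rec (nums : List Int) : pvLevelB nums = pvLevelRec nums true := by
  unfold pvLevelB
  rw [pvLevelB_foldl_rec nums true []]
  simp

-- A's foldl with append-accumulator equals the corresponding map (over any index list)
theorem pvStepA_foldl_map (nums : List Int) : ∀ (l acc : List Int),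
    (l.foldl (fun nn i =>
      let i2 := 2 * i
      if PySem.Int.mod i 2 = 0 then
        nn ++ [min ((PySem.List.pyGet? nums i2).getD 0) ((PySem.List.pyGet? nums (i2 + 1)).getD 0)]
      else
        nn ++ [max ((PySem.List.pyGet? nums i2).getD 0) ((PySem.List.pyGet? nums (i2 + 1)).getD 0)]) acc)
    = acc ++ l.map (fun i =>
        if PySem.Int.mod i 2 = 0 then
          min ((PySem.List.pyGet? nums (2 * i)).getD 0) ((PySem.List.pyGet? nums (2 * i + 1)).getD 0)
        else
          max ((PySem.List.pyGet? nums (2 * i)).getD 0) ((PySem.List.pyGet? nums (2 * i + 1)).getD 0)) := by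
  intro l
  induction l with
  | nil => intro acc; simp
  | cons x xs ih =>
    intro acc
    simp only [List.foldl_cons, List.map_cons]
    split <;> rw [ih] <;> simp

-- A's pass in closed form: map over the natural indices 0 … n/2 - 1
theorem pvStepA_eq_map (nums : List Int) :
    pvStepA nums = (List.range (nums.length / 2)).map (fun j =>
      if j % 2 = 0 then
        min (nums.getD (2 * j) 0) (nums.getD (2 * j + 1) 0)
      else
        max (nums.getD (2 * j) 0) (nums.getD (2 * j + 1) 0)) := by
  unfold pvStepA
  rw [pvStepA_foldl_map]
  have h2 : PySem.Int.floordiv (nums.length : Int) 2 = ((nums.length / 2 : Nat) : Int) := by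
    exact_mod_cast PySem.Int.floordiv_natCast nums.length 2
  rw [h2, PySem.List.pyRange_one]
  simp only [List.nil_append, List.map_map]
  apply List.map_congr_left
  intro j _
  have hmod : PySem.Int.mod ((0 + (j : Int))) 2 = (((j % 2 : Nat)) : Int) := by
    simp only [zero_add]
    exact_mod_cast PySem.Int.mod_natCast j 2
  have hget : ∀ (k : Nat), (PySem.List.pyGet? nums ((k : Nat) : Int)).getD 0 = nums.getD k 0 := by
    intro k; rw [PySem.List.pyGet?_natCast]; simp [List.getD]
  have e2 : (2 : Int) * (j : Int) + 1 = ((2 * j + 1 : Nat) : Int) := by push_cast; ring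
  have e1 : (2 : Int) * (j : Int) = ((2 * j : Nat) : Int) := by push_cast; ring
  simp only [Function.comp, zero_add]
  rw [e2, e1, hget (2 * j), hget (2 * j + 1),
    show PySem.Int.mod (j : Int) 2 = (((j % 2 : Nat)) : Int) from by
      exact_mod_cast PySem.Int.mod_natCast j 2]
  exact if_congr Nat.cast_eq_zero rfl rfl

theorem pvLevelRec_length : ∀ (nums : List Int) (f : Bool),
    (pvLevelRec nums f).length = nums.length / 2 := by
  intro nums f
  induction nums, f using pvLevelRec.induct with
  | case1 a b rest f ih => simp [pvLevelRec, ih]; omega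
  | case2 nums f h =>
    cases nums with
    | nil => simp [pvLevelRec]
    | cons a t => cases t with
      | nil => simp [pvLevelRec]
      | cons b r => exact (h a b r rfl).elim

-- B's structural pair recursion in the same closed form (phase carried by the flag)
theorem pvLevelRec_eq_map : ∀ (nums : List Int) (f : Bool),
    pvLevelRec nums f = (List.range (nums.length / 2)).map (fun j =>
      if (decide (j % 2 = 0)) = f then
        min (nums.getD (2 * j) 0) (nums.getD (2 * j + 1) 0)
      else
        max (nums.getD (2 * j) 0) (nums.getD (2 * j + 1) 0)) := by
  intro nums f
  induction nums, f using pvLevelRec.induct with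
  | case1 a b rest f ih =>
    have hlen : (a :: b :: rest).length / 2 = rest.length / 2 + 1 := by simp; omega
    rw [pvLevelRec, hlen, List.range_succ_eq_map, List.map_cons, List.map_map, ih]
    congr 1
    · cases f <;> simp
    · apply List.map_congr_left
      intro j _
      have h1 : 2 * (j + 1) = 2 * j + 1 + 1 := by ring
      have h2 : 2 * (j + 1) + 1 = 2 * j + 1 + 1 + 1 := by ring
      have hc : (decide ((j + 1) % 2 = 0) = f) = (decide (j % 2 = 0) = !f) := by
        rcases Nat.even_or_odd j with h | h <;>
          · first
              | (simp [Nat.even_iff] at h; cases f <;> simp [h, Nat.add_mod])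
              | (simp [Nat.odd_iff] at h; cases f <;> simp [h, Nat.add_mod])
      simp only [Function.comp, h1, List.getD_cons_succ, hc]
  | case2 nums f h =>
    cases nums with
    | nil => simp [pvLevelRec]
    | cons a t => cases t with
      | nil => simp [pvLevelRec]
      | cons b r => exact (h a b r rfl).elim

theorem pvStepA_eq_level (nums : List Int) : pvStepA nums = pvLevelRec nums true := by
  rw [pvStepA_eq_map, pvLevelRec_eq_map]
  apply List.map_congr_left
  intro j _
  by_cases hj : j % 2 = 0 <;> simp [hj]

theorem pvLoop_eq_alt : ∀ (fuel : Nat) (nums : List Int), nums.length ≤ fuel →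
    (PySem.List.pyGet? (pvLoopA fuel nums) 0).getD 0 = pvAltB fuel nums := by
  intro fuel
  induction fuel with
  | zero => intro nums _; rfl
  | succ f ih =>
    intro nums hlen
    rw [pvLoopA, pvAltB]
    by_cases h : 1 < nums.length
    · rw [if_pos h, if_neg (by omega)]
      rw [pvStepA_eq_level, ← pvLevelB_eq_rec]
      exact ih _ (by rw [pvLevelB_eq_rec, pvLevelRec_length]; omega)
    · rw [if_neg h, if_pos (by omega)]

-- ===== VERDICT (by name: the statement is the Claim_ definition above) =====
theorem minMaxGame3_spec : Claim_equal_minMaxGame3 := by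
  intro nums _ _
  unfold Spec_minMaxGame3 minMaxGame3 minMaxGame3_alt
  exact pvLoop_eq_alt nums.length nums le_rfl
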